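-- pv_equiv track=rewrite | github.com/Sandu953/UBB-Informatica | administrator_de_bloc/f4.py | raport2
-- ===== SOURCE A (Python) =====
-- def raport2(d:dict,c:int):
--     """
--     Tipărește toate apartamentele sortate după un tip de cheltuială
--
--     d-dict
--
--     c-int, rep. tipul cheltuielii
--
--     return l, l-lista apartamentelor sortate
--
--     """
--     if c==1:
--         c='apa'
--     elif c==2:
--         c='canal'
--     elif c==3:
--         c='incalzire'
--     elif c==4:
--         c='gaz'
--     elif c==5:
--         c='altele'
--     l=[]
--     mx=-1
--     mx1=999999
--     while len(l)!=12:
--         for i in d[c]: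
--             if i>mx and i<mx1:
--                 mx=i
--         l.append(mx)
--         mx1=mx
--         mx=-1
--     return l
-- ===== SOURCE B (Python) =====
-- def raport2(d: dict, c: int):
--     """Same result as A: distinct in-range expenses, descending, padded with -1 to 12."""
--     key = {1: 'apa', 2: 'canal', 3: 'incalzire', 4: 'gaz', 5: 'altele'}.get(c, c)
--     vals = sorted({v for v in d[key] if -1 < v < 999999}, reverse=True)
--     vals = vals[:12]
--     return vals + [-1] * (12 - len(vals))
-- ===== Notes on version B (the rewrite author's own statement) =====
-- stated objective: simpler
-- what changed: Replaces the 12-round repeated-max selection loop (a full scan of the list per output slot) with a single sort of the deduplicated in-range values descending, truncated to 12 and padded with -1.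
import Mathlib
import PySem

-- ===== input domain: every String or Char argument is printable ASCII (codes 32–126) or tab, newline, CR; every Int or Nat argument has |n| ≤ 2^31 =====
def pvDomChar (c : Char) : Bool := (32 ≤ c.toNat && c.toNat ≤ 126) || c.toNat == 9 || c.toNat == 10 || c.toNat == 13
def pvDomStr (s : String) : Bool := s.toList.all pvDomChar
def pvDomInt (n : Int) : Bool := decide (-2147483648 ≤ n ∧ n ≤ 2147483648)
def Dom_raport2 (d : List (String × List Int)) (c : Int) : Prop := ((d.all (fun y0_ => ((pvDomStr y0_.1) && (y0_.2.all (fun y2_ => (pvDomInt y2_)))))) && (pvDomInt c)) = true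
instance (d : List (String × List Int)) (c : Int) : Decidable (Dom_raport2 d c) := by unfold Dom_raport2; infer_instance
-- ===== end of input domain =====

-- B replaces A's 12-round repeated-max selection loop by one descending sort of the
-- deduplicated in-range values, truncated to 12 and padded with -1 (objective: simpler).

-- ===== PORT A =====
-- one pass of A's inner 'for i in d[c]: if i>mx and i<mx1: mx=i' loop, mx starting at -1
def raport2Step (xs : List Int) (mx1 : Int) : Int :=
  xs.foldl (fun mx i => if mx < i ∧ i < mx1 then i else mx) (-1)

-- A's 'while len(l)!=12' loop; the fuel is 12 - len(l), so it starts at 12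
def raport2Loop (xs : List Int) : Nat → List Int → Int → List Int
  | 0, l, _ => l
  | n+1, l, mx1 =>
      let mx := raport2Step xs mx1
      raport2Loop xs n (l ++ [mx]) mx

def raport2Body (xs : List Int) : List Int := raport2Loop xs 12 [] 999999

def raport2 (d : List (String × List Int)) (c : Int) : List Int :=
  -- the if/elif chain rebinds c to a string key; an unmapped c keeps its int value and
  -- d[c] raises KeyError (excluded by Pre_), as does a mapped key absent from d
  match (if c = 1 then some "apa" else if c = 2 then some "canal"
         else if c = 3 then some "incalzire" else if c = 4 then some "gaz"
         else if c = 5 then some "altele" else none) with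
  | none => []
  | some k =>
    match (PySem.Dict.mk d).get? k with
    | none => []
    | some xs => raport2Body xs

-- ===== PORT B =====
-- B's 'sorted({v for v in d[key] if -1 < v < 999999}, reverse=True)'
def raport2Vals (xs : List Int) : List Int :=
  PySem.List.sorted (PySem.Set.ofList (xs.filter (fun v => decide (-1 < v ∧ v < 999999))))
    (fun x => x) true

-- B's 'vals = vals[:12]; return vals + [-1] * (12 - len(vals))'
def raport2AltBody (xs : List Int) : List Int :=
  let vals := raport2Vals xs
  let vals2 := PySem.List.slice vals none (some 12)
  vals2 ++ PySem.List.pyRepeat [-1] (12 - PySem.List.len vals2)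

def raport2_alt (d : List (String × List Int)) (c : Int) : List Int :=
  -- B's '{1:'apa',...}.get(c, c)' followed by d[...]; unmapped c / absent key raise as in A
  match (PySem.Dict.ofList [((1:Int),"apa"),(2,"canal"),(3,"incalzire"),(4,"gaz"),(5,"altele")]).get? c with
  | none => []
  | some k =>
    match (PySem.Dict.mk d).get? k with
    | none => []
    | some xs => raport2AltBody xs

-- ===== PRECONDITION & SPEC =====
-- Pre_ excludes exactly the inputs where d[...] raises KeyError in both programs:
-- c outside 1..5, or the mapped expense name not a key of d.
def Pre_raport2 (d : List (String × List Int)) (c : Int) : Prop :=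
  (1 ≤ c ∧ c ≤ 5) ∧
  ((PySem.Dict.mk d).get? (if c = 1 then "apa" else if c = 2 then "canal"
    else if c = 3 then "incalzire" else if c = 4 then "gaz" else "altele")).isSome = true
instance (d : List (String × List Int)) (c : Int) : Decidable (Pre_raport2 d c) := by
  unfold Pre_raport2; infer_instance

def pvWitness_raport2 : (List (String × List Int)) × Int := ([("apa", [3, 1, 3])], 1)

def Spec_raport2 (d : List (String × List Int)) (c : Int) (out : List Int) : Prop := out = raport2_alt d c
instance (d : List (String × List Int)) (c : Int) (out : List Int) : Decidable (Spec_raport2 d c out) := by unfold Spec_raport2; infer_instance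

-- ===== CLAIM (what is proved, stated in full; the proofs are below) =====
def Claim_equal_raport2 : Prop := ∀ (d : List (String × List Int)) (c : Int), Dom_raport2 d c → Pre_raport2 d c → Spec_raport2 d c (raport2 d c)

-- ===== LEMMAS AND PROOFS =====

-- take n then pad with -1 up to n, as one recursion (the common shape of both outputs)
def padTake : Nat → List Int → List Int
  | 0, _ => []
  | n+1, [] => (-1) :: padTake n []
  | n+1, x :: t => x :: padTake n t

lemma take_pad (n : Nat) : ∀ L : List Int,
    L.take n ++ List.replicate (n - L.length) (-1) = padTake n L := by
  induction n with
  | zero => intro L; simp [padTake]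
  | succ n ih =>
    intro L
    cases L with
    | nil => simpa [padTake, List.replicate_succ] using ih []
    | cons x t => simpa [padTake] using ih t

-- a running max from init a depends only on the members above a
lemma foldlmax_eq (u w : List Int) (a : Int)
    (h : ∀ y, (y ∈ u ∧ a < y) ↔ (y ∈ w ∧ a < y)) : u.foldl max a = w.foldl max a := by
  have hu := PySem.List.le_foldl_max u a
  have hw := PySem.List.le_foldl_max w a
  apply le_antisymm
  · rcases PySem.List.foldl_max_mem u a with h1 | h1
    · rw [h1]; exact hw.1
    · rcases Int.lt_or_le a (u.foldl max a) with hlt | hle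
      · exact hw.2 _ ((h _).1 ⟨h1, hlt⟩).1
      · exact le_trans hle hw.1
  · rcases PySem.List.foldl_max_mem w a with h1 | h1
    · rw [h1]; exact hu.1
    · rcases Int.lt_or_le a (w.foldl max a) with hlt | hle
      · exact hu.2 _ ((h _).2 ⟨h1, hlt⟩).1
      · exact le_trans hle hu.1

-- one pass of A's inner loop is a running max over the values below mx1
lemma step_filter (xs : List Int) (m1 : Int) :
    raport2Step xs m1 = (xs.filter (fun i => decide (i < m1))).foldl max (-1) := by
  rw [raport2Step, List.foldl_filter]
  congr 1
  funext mx i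
  by_cases h1 : i < m1
  · by_cases h2 : mx < i
    · simp [h1, h2, max_eq_right h2.le]
    · simp [h1, h2, max_eq_left (le_of_not_gt h2)]
  · simp [h1]

lemma head_sorted_desc (h : Int) (t : List Int)
    (hp : (h :: t).Pairwise (fun a b => b < a)) (hh : -1 < h) :
    (h :: t).foldl max (-1) = h := by
  have hcons := List.pairwise_cons.mp hp
  simp only [List.foldl_cons, max_eq_right hh.le]
  rcases PySem.List.foldl_max_mem t h with h1 | h1
  · exact h1
  · exact absurd ((PySem.List.le_foldl_max t h).1) (not_le_of_gt (hcons.1 _ h1))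

-- the invariant of A's outer loop: with L the (strictly descending, in-range, below-mx1)
-- remaining values, each round emits L's head (or -1) and moves to L's tail
lemma loop_eq (xs : List Int) : ∀ (n : Nat) (acc : List Int) (m1 : Int) (L : List Int),
    (∀ y, (y ∈ xs ∧ -1 < y ∧ y < m1) ↔ y ∈ L) →
    L.Pairwise (fun a b => b < a) →
    raport2Loop xs n acc m1 = acc ++ padTake n L := by
  intro n
  induction n with
  | zero => intro acc m1 L _ _; simp [raport2Loop, padTake]
  | succ n ih =>
    intro acc m1 L hmem hp
    have hstep : raport2Step xs m1 = L.foldl max (-1) := by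
      rw [step_filter]
      apply foldlmax_eq
      intro y
      constructor
      · rintro ⟨hy, hay⟩
        have hf := List.mem_filter.mp hy
        exact ⟨(hmem y).1 ⟨hf.1, hay, by simpa using hf.2⟩, hay⟩
      · rintro ⟨hy, hay⟩
        obtain ⟨hx, _, hlt⟩ := (hmem y).2 hy
        exact ⟨List.mem_filter.mpr ⟨hx, by simpa using hlt⟩, hay⟩
    cases L with
    | nil =>
      have h0 : raport2Step xs m1 = -1 := by rw [hstep]; rfl
      show raport2Loop xs n (acc ++ [raport2Step xs m1]) (raport2Step xs m1) = _
      rw [h0, ih (acc ++ [-1]) (-1) []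
        (by intro y; simp; omega) List.Pairwise.nil]
      simp [padTake]
    | cons h t =>
      have hhead := (hmem h).2 (List.mem_cons_self ..)
      have hcons := List.pairwise_cons.mp hp
      have h0 : raport2Step xs m1 = h := by
        rw [hstep]; exact head_sorted_desc h t hp hhead.2.1
      show raport2Loop xs n (acc ++ [raport2Step xs m1]) (raport2Step xs m1) = _
      rw [h0, ih (acc ++ [h]) h t ?_ hcons.2]
      · simp [padTake]
      · intro y
        constructor
        · rintro ⟨hy, hay, hyh⟩
          have : y ∈ h :: t := (hmem y).1 ⟨hy, hay, hyh.trans hhead.2.2⟩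
          rcases List.mem_cons.mp this with rfl | hyt
          · exact absurd hyh (lt_irrefl _)
          · exact hyt
        · intro hyt
          obtain ⟨hy, hay, _⟩ := (hmem y).2 (List.mem_cons_of_mem _ hyt)
          exact ⟨hy, hay, hcons.1 _ hyt⟩

lemma mem_vals (xs : List Int) (y : Int) :
    y ∈ raport2Vals xs ↔ y ∈ xs ∧ -1 < y ∧ y < 999999 := by
  simp [raport2Vals, PySem.List.mem_sorted, PySem.Set.mem_ofList, List.mem_filter]

lemma pairwise_vals (xs : List Int) :
    (raport2Vals xs).Pairwise (fun a b => b < a) := by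
  have h1 : (raport2Vals xs).Pairwise (fun a b => b ≤ a) :=
    PySem.List.sorted_pairwise_rev _ _
  have h2 : (raport2Vals xs).Nodup :=
    ((PySem.List.sorted_perm _ _ _).nodup_iff).mpr (PySem.Set.nodup_ofList _)
  exact (h1.and h2).imp (fun h => lt_of_le_of_ne h.1 h.2.symm)

lemma body_eq (xs : List Int) : raport2Body xs = raport2AltBody xs := by
  have hL := loop_eq xs 12 [] 999999 (raport2Vals xs)
    (fun y => (mem_vals xs y).symm)
    (pairwise_vals xs)
  rw [raport2Body, hL, List.nil_append]
  · rw [raport2AltBody]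
    have hslice : PySem.List.slice (raport2Vals xs) none (some 12)
        = (raport2Vals xs).take 12 := by
      rw [PySem.List.slice_to _ (by norm_num)]; rfl
    rw [hslice, PySem.List.pyRepeat_singleton, PySem.List.len_eq]
    have harith : ((12 : Int) - ((raport2Vals xs).take 12).length).toNat
        = 12 - (raport2Vals xs).length := by
      have h2 : ((raport2Vals xs).take 12).length = min 12 (raport2Vals xs).length :=
        List.length_take
      omega
    rw [harith, take_pad]

-- ===== VERDICT (by name: the statement is the Claim_ definition above) =====
-- under Pre_ the two key computations produce the same string key
lemma keyA_eq (c : Int) (h1 : 1 ≤ c) (h5 : c ≤ 5) :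
    (if c = 1 then some "apa" else if c = 2 then some "canal"
     else if c = 3 then some "incalzire" else if c = 4 then some "gaz"
     else if c = 5 then some "altele" else none)
    = some (if c = 1 then "apa" else if c = 2 then "canal"
       else if c = 3 then "incalzire" else if c = 4 then "gaz" else "altele") := by
  have h : c = 1 ∨ c = 2 ∨ c = 3 ∨ c = 4 ∨ c = 5 := by omega
  rcases h with rfl | rfl | rfl | rfl | rfl <;> rfl

lemma keyB_eq (c : Int) (h1 : 1 ≤ c) (h5 : c ≤ 5) :
    (PySem.Dict.ofList [((1:Int),"apa"),(2,"canal"),(3,"incalzire"),(4,"gaz"),(5,"altele")]).get? c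
    = some (if c = 1 then "apa" else if c = 2 then "canal"
       else if c = 3 then "incalzire" else if c = 4 then "gaz" else "altele") := by
  have h : c = 1 ∨ c = 2 ∨ c = 3 ∨ c = 4 ∨ c = 5 := by omega
  rcases h with rfl | rfl | rfl | rfl | rfl <;> decide

theorem raport2_spec : Claim_equal_raport2 := by
  intro d c _ hpre
  obtain ⟨⟨hc1, hc5⟩, hsome⟩ := hpre
  unfold Spec_raport2
  simp only [raport2, raport2_alt, keyA_eq c hc1 hc5, keyB_eq c hc1 hc5]
  rcases hget : (PySem.Dict.mk d).get?
      (if c = 1 then "apa" else if c = 2 then "canal"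
       else if c = 3 then "incalzire" else if c = 4 then "gaz" else "altele") with _ | xs
  · rw [hget] at hsome
  · simp [body_eq]
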